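-- pv_equiv track=rewrite | github.com/WallerTsai/OJ-Solution | leetcode-py/前缀/前后缀分解/No3891.py | minIncrease
-- ===== SOURCE A (Python) =====
-- from typing import List
--
-- def minIncrease(nums: List[int]) -> int:
--     def func(i, n):
--         res = 0
--         while i < n - 1:
--             if nums[i] <= nums[i - 1] or nums[i] <= nums[i + 1]:
--                 res += max(nums[i - 1], nums[i + 1]) - nums[i] + 1
--             i += 2
--         return res
--
--     ans = 0
--     n = len(nums)
--     if n & 1:
--          ans = func(1, n)
--     else:
--         ans = min(func(1, n), func(2, n))
--
--     return ans  # 错误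
-- ===== SOURCE B (Python) =====
-- def minIncrease(nums):
--     n = len(nums)
--     sum_odd = 0
--     sum_even = 0
--     for i in range(1, n - 1):
--         if nums[i] <= nums[i - 1] or nums[i] <= nums[i + 1]:
--             inc = max(nums[i - 1], nums[i + 1]) - nums[i] + 1
--             if i & 1:
--                 sum_odd += inc
--             else:
--                 sum_even += inc
--     return sum_odd if n & 1 else min(sum_odd, sum_even)
-- ===== Notes on version B (the rewrite author's own statement) =====
-- stated objective: alternative
-- what changed: Replaces the two separate stride-2 scans (func(1,n) and func(2,n)) with a single pass over range(1, n-1) maintaining two parity accumulators, choosing the answer by the parity of n at the end.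
import Mathlib
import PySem

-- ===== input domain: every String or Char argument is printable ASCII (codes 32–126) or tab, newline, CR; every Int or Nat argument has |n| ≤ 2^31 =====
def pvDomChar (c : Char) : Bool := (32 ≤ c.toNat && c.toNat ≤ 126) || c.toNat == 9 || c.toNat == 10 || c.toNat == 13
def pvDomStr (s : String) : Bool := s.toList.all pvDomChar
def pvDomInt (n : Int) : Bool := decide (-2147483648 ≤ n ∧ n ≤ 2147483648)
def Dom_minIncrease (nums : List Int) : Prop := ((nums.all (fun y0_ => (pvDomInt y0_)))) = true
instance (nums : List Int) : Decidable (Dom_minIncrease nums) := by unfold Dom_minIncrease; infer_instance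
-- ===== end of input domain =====

-- B replaces A's two stride-2 scans by one pass with two parity accumulators (objective: alternative).
-- ===== PORT A =====
-- 'func': the while loop, res accumulated; indexing via pyGetD 0 is exact here because every access
-- at a call site has 1 ≤ i < n-1 with n = len nums, so Python never raises.
def pvFuncA (nums : List Int) (n : Int) (i : Int) (res : Int) : Int :=
  if _h : i < n - 1 then
    if PySem.List.pyGetD nums i 0 ≤ PySem.List.pyGetD nums (i - 1) 0 ∨
       PySem.List.pyGetD nums i 0 ≤ PySem.List.pyGetD nums (i + 1) 0 then
      pvFuncA nums n (i + 2)
        (res + (max (PySem.List.pyGetD nums (i - 1) 0) (PySem.List.pyGetD nums (i + 1) 0)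
                - PySem.List.pyGetD nums i 0 + 1))
    else pvFuncA nums n (i + 2) res
  else res
termination_by (n - 1 - i).toNat
decreasing_by all_goals omega

def minIncrease (nums : List Int) : Int :=
  let n : Int := nums.length
  if n % 2 = 1 then pvFuncA nums n 1 0
  else min (pvFuncA nums n 1 0) (pvFuncA nums n 2 0)

-- ===== PORT B =====
-- single pass over range(1, n-1) carrying the pair (sum_odd, sum_even)
def pvStepB (nums : List Int) (acc : Int × Int) (i : Int) : Int × Int :=
  if PySem.List.pyGetD nums i 0 ≤ PySem.List.pyGetD nums (i - 1) 0 ∨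
     PySem.List.pyGetD nums i 0 ≤ PySem.List.pyGetD nums (i + 1) 0 then
    let inc := max (PySem.List.pyGetD nums (i - 1) 0) (PySem.List.pyGetD nums (i + 1) 0)
               - PySem.List.pyGetD nums i 0 + 1
    if i % 2 = 1 then (acc.1 + inc, acc.2) else (acc.1, acc.2 + inc)
  else acc

def minIncrease_alt (nums : List Int) : Int :=
  let n : Int := nums.length
  let p := (PySem.List.pyRange 1 (n - 1) 1).foldl (pvStepB nums) (0, 0)
  if n % 2 = 1 then p.1 else min p.1 p.2

-- ===== PRECONDITION & SPEC =====
def Spec_minIncrease (nums : List Int) (out : Int) : Prop := out = minIncrease_alt nums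
instance (nums : List Int) (out : Int) : Decidable (Spec_minIncrease nums out) := by unfold Spec_minIncrease; infer_instance

-- ===== CLAIM (what is proved, stated in full; the proofs are below) =====
def Claim_equal_minIncrease : Prop := ∀ (nums : List Int), Dom_minIncrease nums → Spec_minIncrease nums (minIncrease nums)

-- ===== LEMMAS AND PROOFS =====

-- the increment A adds at index i (0 when the condition fails)
def pvInc (nums : List Int) (i : Int) : Int :=
  if PySem.List.pyGetD nums i 0 ≤ PySem.List.pyGetD nums (i - 1) 0 ∨
     PySem.List.pyGetD nums i 0 ≤ PySem.List.pyGetD nums (i + 1) 0 then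
    max (PySem.List.pyGetD nums (i - 1) 0) (PySem.List.pyGetD nums (i + 1) 0)
      - PySem.List.pyGetD nums i 0 + 1
  else 0

theorem pvFuncA_acc (nums : List Int) (n : Int) :
    ∀ (k : Nat) (i res : Int), (n - 1 - i).toNat = k →
      pvFuncA nums n i res = res + pvFuncA nums n i 0 := by
  intro k
  induction k using Nat.strong_induction_on with
  | _ k ih =>
    intro i res hk
    rw [pvFuncA]
    conv_rhs => rw [pvFuncA]
    by_cases h : i < n - 1
    · simp only [h, dif_pos]
      split
      · rw [ih (n - 1 - (i + 2)).toNat (by omega) (i + 2) _ rfl]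
        conv_rhs => rw [ih (n - 1 - (i + 2)).toNat (by omega) (i + 2) _ rfl]
        ring
      · rw [ih (n - 1 - (i + 2)).toNat (by omega) (i + 2) _ rfl]
    · simp [h]

theorem pvFuncA_step (nums : List Int) (n i : Int) (h : i < n - 1) :
    pvFuncA nums n i 0 = pvInc nums i + pvFuncA nums n (i + 2) 0 := by
  conv_lhs => rw [pvFuncA]
  simp only [h, dif_pos]
  unfold pvInc
  split
  · rw [pvFuncA_acc nums n (n - 1 - (i + 2)).toNat (i + 2) _ rfl]; ring
  · ring_nf

theorem pvFuncA_nil (nums : List Int) (n i : Int) (h : ¬ i < n - 1) :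
    pvFuncA nums n i 0 = 0 := by
  rw [pvFuncA]; simp [h]

theorem pvFold_parity (nums : List Int) (n : Int) :
    ∀ (k : Nat) (i so se : Int), (n - 1 - i).toNat = k →
      (PySem.List.pyRange i (n - 1) 1).foldl (pvStepB nums) (so, se) =
        (if i % 2 = 1 then
          (so + pvFuncA nums n i 0, se + pvFuncA nums n (i + 1) 0)
         else
          (so + pvFuncA nums n (i + 1) 0, se + pvFuncA nums n i 0)) := by
  intro k
  induction k using Nat.strong_induction_on with
  | _ k ih =>
    intro i so se hk
    by_cases h : i < n - 1
    · rw [PySem.List.pyRange_one_cons h]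
      simp only [List.foldl_cons]
      have hstep : pvStepB nums (so, se) i =
          (if i % 2 = 1 then (so + pvInc nums i, se) else (so, se + pvInc nums i)) := by
        unfold pvStepB pvInc
        by_cases hc : PySem.List.pyGetD nums i 0 ≤ PySem.List.pyGetD nums (i - 1) 0 ∨
            PySem.List.pyGetD nums i 0 ≤ PySem.List.pyGetD nums (i + 1) 0
        · simp only [hc, if_pos]
        · simp [hc]
      rw [hstep]
      have h2 : i + 1 + 1 = i + 2 := by ring
      by_cases hpar : i % 2 = 1
      · have hpar' : ¬ (i + 1) % 2 = 1 := by omega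
        rw [if_pos hpar, ih (n - 1 - (i + 1)).toNat (by omega) (i + 1) _ _ rfl,
            if_neg hpar', if_pos hpar, h2, pvFuncA_step nums n i h]
        simp only [Prod.mk.injEq]
        exact ⟨by ring, trivial⟩
      · have hpar' : (i + 1) % 2 = 1 := by omega
        rw [if_neg hpar, ih (n - 1 - (i + 1)).toNat (by omega) (i + 1) _ _ rfl,
            if_pos hpar', if_neg hpar, h2, pvFuncA_step nums n i h]
        simp only [Prod.mk.injEq]
        exact ⟨trivial, by ring⟩
    · rw [PySem.List.pyRange_one_eq_nil (by omega)]
      simp only [List.foldl_nil]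
      rw [pvFuncA_nil nums n i h, pvFuncA_nil nums n (i + 1) (by omega)]
      split <;> simp

-- ===== VERDICT (by name: the statement is the Claim_ definition above) =====
theorem minIncrease_spec : Claim_equal_minIncrease := by
  intro nums _
  unfold Spec_minIncrease minIncrease minIncrease_alt
  simp only
  rw [pvFold_parity nums (nums.length : Int) _ 1 0 0 rfl]
  norm_num
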